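-- pv_equiv track=rewrite | github.com/acady14/transitEval | Gmaps_DataPull_utility.py | init_vectorList
-- ===== SOURCE A (Python) =====
-- def init_vectorList(polygon):
--     vectorList=[]
--     i=0
--     for point in polygon:
--         try:
--             vectorList.append((polygon[i+1][0]-point[0],polygon[i+1][1]-point[1]))
--         except IndexError:
--             vectorList.append((polygon[0][0]-point[0],polygon[0][1]-point[1]))
--         i+=1
--     return vectorList
-- ===== SOURCE B (Python) =====
-- def init_vectorList(polygon):
--     # Reverse traversal: walk the polygon backwards carrying the successor
--     # vertex (the successor of the last vertex is the first), building the
--     # edge list back-to-front, then reverse it. No indexing arithmetic,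
--     # no rotation, no exception handling.
--     if not polygon:
--         return []
--     out = []
--     nxt = polygon[0]
--     for cur in reversed(polygon):
--         out.append((nxt[0] - cur[0], nxt[1] - cur[1]))
--         nxt = cur
--     out.reverse()
--     return out
-- ===== Notes on version B (the rewrite author's own statement) =====
-- stated objective: alternative
-- what changed: Replaces A's forward indexed pass with exception-based wraparound by a reverse traversal that carries the successor vertex and builds the edge list back-to-front, reversing it at the end.
import Mathlib
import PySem

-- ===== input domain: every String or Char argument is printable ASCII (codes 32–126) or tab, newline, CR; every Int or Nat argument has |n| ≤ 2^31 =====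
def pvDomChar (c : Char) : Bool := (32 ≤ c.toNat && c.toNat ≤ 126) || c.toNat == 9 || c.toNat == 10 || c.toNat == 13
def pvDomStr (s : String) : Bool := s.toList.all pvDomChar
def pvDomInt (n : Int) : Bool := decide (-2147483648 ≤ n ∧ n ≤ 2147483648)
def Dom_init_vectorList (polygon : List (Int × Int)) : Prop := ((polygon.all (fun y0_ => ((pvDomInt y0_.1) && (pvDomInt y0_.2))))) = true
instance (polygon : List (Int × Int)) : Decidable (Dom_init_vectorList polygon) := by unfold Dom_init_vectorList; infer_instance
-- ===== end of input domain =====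

-- B replaces A's forward indexed loop with exception-based wraparound by a reverse
-- traversal carrying the successor vertex, building the edge list back-to-front and
-- reversing it at the end (alternative traversal; same cost). A is total, so no Pre_.

-- ===== PORT A =====
-- state = (vectorList, i); the `none` branch is Python's `except IndexError` path, where
-- polygon[0] is read (the loop body runs only when polygon ≠ [], so headD's default is dead).
def init_vectorList (polygon : List (Int × Int)) : List (Int × Int) :=
  (polygon.foldl
    (fun (st : List (Int × Int) × Int) point =>
      match PySem.List.pyGet? polygon (st.2 + 1) with
      | some q => (st.1 ++ [(q.1 - point.1, q.2 - point.2)], st.2 + 1)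
      | none =>
        let q := polygon.headD (0, 0)
        (st.1 ++ [(q.1 - point.1, q.2 - point.2)], st.2 + 1))
    ([], 0)).1

-- ===== PORT B =====
-- state = (out, nxt); iterate over reversed(polygon), then reverse out
def init_vectorList_alt (polygon : List (Int × Int)) : List (Int × Int) :=
  match polygon with
  | [] => []
  | first :: _ =>
    (polygon.reverse.foldl
      (fun (st : List (Int × Int) × (Int × Int)) cur =>
        (st.1 ++ [(st.2.1 - cur.1, st.2.2 - cur.2)], cur))
      ([], first)).1.reverse

-- ===== PRECONDITION & SPEC =====
def Spec_init_vectorList (polygon : List (Int × Int)) (out : List (Int × Int)) : Prop := out = init_vectorList_alt polygon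
instance (polygon : List (Int × Int)) (out : List (Int × Int)) : Decidable (Spec_init_vectorList polygon out) := by unfold Spec_init_vectorList; infer_instance

-- ===== CLAIM (what is proved, stated in full; the proofs are below) =====
def Claim_equal_init_vectorList : Prop := ∀ (polygon : List (Int × Int)), Dom_init_vectorList polygon → Spec_init_vectorList polygon (init_vectorList polygon)

-- ===== LEMMAS AND PROOFS =====

-- forward edges of `prev :: l` with wraparound to `first` (proof-side description)
def edgesB (first : Int × Int) : (Int × Int) → List (Int × Int) → List (Int × Int)
  | prev, [] => [(first.1 - prev.1, first.2 - prev.2)]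
  | prev, cur :: rest => (cur.1 - prev.1, cur.2 - prev.2) :: edgesB first cur rest

-- edges emitted by B's reverse pass, in emission order
def revE : (Int × Int) → List (Int × Int) → List (Int × Int)
  | _, [] => []
  | nxt, cur :: rest => (nxt.1 - cur.1, nxt.2 - cur.2) :: revE cur rest

lemma foldB_eq : ∀ (l out : List (Int × Int)) (nxt : Int × Int),
    (l.foldl
      (fun (st : List (Int × Int) × (Int × Int)) cur =>
        (st.1 ++ [(st.2.1 - cur.1, st.2.2 - cur.2)], cur))
      (out, nxt)) = (out ++ revE nxt l, l.getLastD nxt) := by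
  intro l
  induction l with
  | nil => intro out nxt; simp [revE]
  | cons cur rest ih =>
    intro out nxt
    simp only [List.foldl_cons, revE, List.getLastD_cons]
    rw [ih]
    simp

lemma revE_append_one : ∀ (zs : List (Int × Int)) (nxt p : Int × Int),
    revE nxt (zs ++ [p]) =
      revE nxt zs ++ [((zs.getLastD nxt).1 - p.1, (zs.getLastD nxt).2 - p.2)] := by
  intro zs
  induction zs with
  | nil => intro nxt p; simp [revE]
  | cons a zs ih =>
    intro nxt p
    simp only [List.cons_append, revE, List.getLastD_cons, ih, List.cons_append]

lemma revE_reverse (l : List (Int × Int)) : ∀ (nxt prev : Int × Int),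
    revE nxt (l.reverse ++ [prev]) = (edgesB nxt prev l).reverse := by
  induction l with
  | nil => intro nxt prev; simp [revE, edgesB]
  | cons cur rest ih =>
    intro nxt prev
    have h1 : (cur :: rest).reverse ++ [prev] = (rest.reverse ++ [cur]) ++ [prev] := by simp
    rw [h1, revE_append_one]
    have h2 : (rest.reverse ++ [cur]).getLastD nxt = cur := by simp
    rw [h2, ih nxt cur]
    simp [edgesB]

-- recursive description of A's loop: element for source point p at index i
def goA (polygon : List (Int × Int)) : List (Int × Int) → Nat → List (Int × Int)
  | [], _ => []
  | p :: l, i =>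
    (match polygon[i+1]? with
     | some q => (q.1 - p.1, q.2 - p.2)
     | none => ((polygon.headD (0,0)).1 - p.1, (polygon.headD (0,0)).2 - p.2)) :: goA polygon l (i+1)

lemma foldA_eq (polygon : List (Int × Int)) :
    ∀ (l acc : List (Int × Int)) (i : Nat),
      (l.foldl
        (fun (st : List (Int × Int) × Int) point =>
          match PySem.List.pyGet? polygon (st.2 + 1) with
          | some q => (st.1 ++ [(q.1 - point.1, q.2 - point.2)], st.2 + 1)
          | none =>
            let q := polygon.headD (0, 0)
            (st.1 ++ [(q.1 - point.1, q.2 - point.2)], st.2 + 1))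
        (acc, (i : Int))).1 = acc ++ goA polygon l i := by
  intro l
  induction l with
  | nil => intro acc i; simp [goA]
  | cons p l ih =>
    intro acc i
    have hidx : (i : Int) + 1 = ((i + 1 : Nat) : Int) := by push_cast; ring
    simp only [List.foldl_cons, goA, hidx, PySem.List.pyGet?_natCast]
    cases h : polygon[i+1]? with
    | none =>
      have := ih (acc ++ [((polygon.headD (0,0)).1 - p.1, (polygon.headD (0,0)).2 - p.2)]) (i+1)
      simpa using this
    | some q =>
      have := ih (acc ++ [(q.1 - p.1, q.2 - p.2)]) (i+1)
      simpa using this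

-- goA for a tail of the full polygon, at the matching start index, agrees with edgesB
lemma goA_eq_edgesB (first : Int × Int) (rest : List (Int × Int)) :
    ∀ (l : List (Int × Int)) (prev : Int × Int) (i : Nat),
      first :: rest = (first :: rest).take (i+1) ++ l →
      (first :: rest)[i]? = some prev →
      goA (first :: rest) (prev :: l) i = edgesB first prev l := by
  intro l
  induction l with
  | nil =>
    intro prev i htake hprev
    have hlen : (first :: rest).length = i + 1 := by
      have := congrArg List.length htake
      simp at this
      have hi : i < (first :: rest).length := by
        have := List.getElem?_eq_some_iff.mp hprev
        exact this.1
      simp; simp at hi; omega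
    have hnone : (first :: rest)[i+1]? = none := by
      apply List.getElem?_eq_none; omega
    simp [goA, edgesB, hnone]
  | cons cur l ih =>
    intro prev i htake hprev
    have hi1 : (first :: rest)[i+1]? = some cur := by
      have : (first :: rest)[i+1]? = ((first :: rest).take (i+1) ++ cur :: l)[i+1]? := by
        rw [← htake]
      rw [this]
      have hlen : ((first :: rest).take (i+1)).length = i + 1 := by
        have := congrArg List.length htake
        simp at this ⊢
        omega
      rw [List.getElem?_append_right hlen.le, hlen]
      simp
    have htake' : first :: rest = (first :: rest).take (i+2) ++ l := by
      conv_lhs => rw [htake]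
      have : (first :: rest).take (i+2) = (first :: rest).take (i+1) ++ [cur] := by
        rw [show i+2 = (i+1) + 1 from rfl, List.take_add_one, hi1]
        rfl
      rw [this]; simp
    simp only [goA, hi1, edgesB]
    exact congrArg _ (ih cur (i+1) htake' hi1)

-- ===== VERDICT (by name: the statement is the Claim_ definition above) =====
theorem init_vectorList_spec : Claim_equal_init_vectorList := by
  intro polygon _
  unfold Spec_init_vectorList
  cases polygon with
  | nil => rfl
  | cons first rest =>
    have hA := foldA_eq (first :: rest) (first :: rest) [] 0
    norm_cast at hA
    unfold init_vectorList
    rw [hA, List.nil_append, goA_eq_edgesB first rest rest first 0 (by simp) (by simp)]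
    simp only [init_vectorList_alt]
    rw [show (first :: rest).reverse = rest.reverse ++ [first] by simp, foldB_eq,
      revE_reverse rest first first]
    simp
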